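-- pv_equiv track=rewrite | github.com/yohlimem/Wordle-and-the-solver | words.py | get_letter_count_and_position
-- ===== SOURCE A (Python) =====
-- def get_letter_count_and_position(word):
--     chars = [x for x in word]
--     char_count = {}
--     char_positions = {}
--     for i, char in enumerate(chars):
--         if char in char_count:
--             char_count[char] += 1
--         else:
--             char_count[char] = 1
--         if char not in char_positions:
--             char_positions[char] = [i]
--         else:
--             char_positions[char].append(i)
--     return char_count, char_positions
-- ===== SOURCE B (Python) =====
-- def get_letter_count_and_position(word):
--     chars = [x for x in word]
--     char_count = {}
--     char_positions = {}
--     for c in dict.fromkeys(chars):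
--         char_count[c] = chars.count(c)
--         char_positions[c] = [i for i, x in enumerate(chars) if x == c]
--     return char_count, char_positions
-- ===== Notes on version B (the rewrite author's own statement) =====
-- stated objective: alternative
-- what changed: Instead of A's single enumerate pass maintaining two dicts incrementally, B loops over the distinct characters (dict.fromkeys) and computes each entry by scanning the word per character: chars.count(c) for the count and a filtered enumerate comprehension for the positions.
import Mathlib
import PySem

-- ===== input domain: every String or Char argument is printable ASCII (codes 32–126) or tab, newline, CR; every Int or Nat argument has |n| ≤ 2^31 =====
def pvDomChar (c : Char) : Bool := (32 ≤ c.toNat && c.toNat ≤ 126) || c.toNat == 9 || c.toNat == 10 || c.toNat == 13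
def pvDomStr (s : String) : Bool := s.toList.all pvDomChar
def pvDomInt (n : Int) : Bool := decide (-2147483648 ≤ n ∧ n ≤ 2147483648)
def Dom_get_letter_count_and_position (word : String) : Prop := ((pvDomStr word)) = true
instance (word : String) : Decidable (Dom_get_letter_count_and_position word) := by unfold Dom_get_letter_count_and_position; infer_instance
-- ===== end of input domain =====

-- B replaces A's single merged dict-building pass with a loop over the distinct
-- characters that scans the word per character (count + filtered enumerate);
-- objective: alternative (O(n·k) nested scans instead of one O(n) pass).

-- ===== PORT A =====
def get_letter_count_and_position (word : String) : (List (String × Int)) × (List (String × List Int)) :=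
  let chars : List String := word.toList.map (fun x => String.ofList [x])
  let st := (PySem.List.enumerate chars).foldl
    (fun (st : PySem.Dict String Int × PySem.Dict String (List Int)) ic =>
      let char_count := if st.1.contains ic.2 then st.1.insert ic.2 (st.1.getD ic.2 0 + 1)
                        else st.1.insert ic.2 1
      let char_positions := if ¬ st.2.contains ic.2 then st.2.insert ic.2 [ic.1]
                            else st.2.modify ic.2 [] (fun l => l ++ [ic.1])
      (char_count, char_positions))
    (PySem.Dict.empty, PySem.Dict.empty)
  (st.1.items, st.2.items)

-- ===== PORT B =====
def get_letter_count_and_position_alt (word : String) : (List (String × Int)) × (List (String × List Int)) :=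
  let chars : List String := word.toList.map (fun x => String.ofList [x])
  let st := (PySem.List.dedup chars).foldl
    (fun (st : PySem.Dict String Int × PySem.Dict String (List Int)) c =>
      (st.1.insert c ((PySem.List.count chars c : Int)),
       st.2.insert c (((PySem.List.enumerate chars).filter (fun p => p.2 == c)).map (fun p => p.1))))
    (PySem.Dict.empty, PySem.Dict.empty)
  (st.1.items, st.2.items)

-- ===== PRECONDITION & SPEC =====
def Spec_get_letter_count_and_position (word : String) (out : (List (String × Int)) × (List (String × List Int))) : Prop := out = get_letter_count_and_position_alt word
instance (word : String) (out : (List (String × Int)) × (List (String × List Int))) : Decidable (Spec_get_letter_count_and_position word out) := by unfold Spec_get_letter_count_and_position; infer_instance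

-- ===== CLAIM (what is proved, stated in full; the proofs are below) =====
def Claim_equal_get_letter_count_and_position : Prop := ∀ (word : String), Dom_get_letter_count_and_position word → Spec_get_letter_count_and_position word (get_letter_count_and_position word)

-- ===== LEMMAS AND PROOFS =====

/-- A's count step always inserts `getD + 1` (when the key is absent `getD` is 0). -/
theorem countStep_norm :
    (fun (d : PySem.Dict String Int) (ic : Int × String) =>
        if d.contains ic.2 then d.insert ic.2 (d.getD ic.2 0 + 1) else d.insert ic.2 1)
    = (fun (d : PySem.Dict String Int) (ic : Int × String) =>
        d.insert ic.2 (d.getD ic.2 0 + 1)) := by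
  funext d ic
  by_cases h : d.contains ic.2 = true
  · simp [h]
  · have h0 : d.getD ic.2 0 = 0 :=
      PySem.Dict.getD_of_not_contains d 0 (by simpa using h)
    simp [h, h0]

/-- A's position step is always a `modify` (on an absent key `modify` inserts `[] ++ [i]`). -/
theorem posStep_norm :
    (fun (d : PySem.Dict String (List Int)) (ic : Int × String) =>
        if ¬ d.contains ic.2 then d.insert ic.2 [ic.1]
        else d.modify ic.2 [] (fun l => l ++ [ic.1]))
    = (fun (d : PySem.Dict String (List Int)) (ic : Int × String) =>
        d.modify ic.2 [] (fun l => l ++ [ic.1])) := by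
  funext d ic
  by_cases h : d.contains ic.2 = true
  · simp [h]
  · have h0 : d.getD ic.2 [] = [] :=
      PySem.Dict.getD_of_not_contains d [] (by simpa using h)
    simp [h, PySem.Dict.modify, h0]

/-- A's positions dict, folded over the swapped enumerate list. -/
def posDict (chars : List String) : PySem.Dict String (List Int) :=
  ((PySem.List.enumerate chars).map Prod.swap).foldl
    (fun d p => d.modify p.1 [] (fun l => l ++ [p.2])) PySem.Dict.empty

theorem swap_fst (chars : List String) :
    ((PySem.List.enumerate chars).map Prod.swap).map (fun p => p.1) = chars := by
  rw [List.map_map]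
  exact PySem.List.map_snd_enumerate chars 0

theorem posDict_keys (chars : List String) :
    (posDict chars).keys = PySem.Set.ofList chars := by
  have h := PySem.Dict.keys_foldl_modify_key
    ((PySem.List.enumerate chars).map Prod.swap) (fun p : String × Int => p.1)
    ([] : List Int) (fun _ p => fun l => l ++ [p.2]) PySem.Dict.empty
  unfold posDict
  simpa [swap_fst chars] using h

theorem posDict_getD (chars : List String) (c : String) :
    (posDict chars).getD c []
      = ((PySem.List.enumerate chars).filter (fun p => p.2 == c)).map (fun p => p.1) := by
  have h := PySem.Dict.getD_foldl_modify_append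
    ((PySem.List.enumerate chars).map Prod.swap) PySem.Dict.empty c
  unfold posDict
  rw [h]
  simp [List.filter_map, List.map_map, Function.comp_def]

theorem posDict_items (chars : List String) :
    (posDict chars).items
      = (PySem.Set.ofList chars).map
          (fun c => (c, ((PySem.List.enumerate chars).filter (fun p => p.2 == c)).map (fun p => p.1))) := by
  have hnd : (posDict chars).keys.Nodup := by
    unfold posDict
    exact PySem.Dict.nodup_keys_foldl_modify_key _ (fun p : String × Int => p.1) []
      (fun _ p => fun l => l ++ [p.2]) PySem.Dict.empty (by simp)
  rw [PySem.Dict.items_eq_map_keys (posDict chars) hnd [], posDict_keys]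
  exact List.map_congr_left (fun c _ => by rw [posDict_getD])

-- ===== VERDICT (by name: the statement is the Claim_ definition above) =====
theorem get_letter_count_and_position_spec : Claim_equal_get_letter_count_and_position := by
  intro word _
  unfold Spec_get_letter_count_and_position get_letter_count_and_position get_letter_count_and_position_alt
  dsimp only
  set chars : List String := word.toList.map (fun x => String.ofList [x]) with hchars
  -- split both paired folds into two independent folds
  rw [PySem.List.foldl_prod_mk
        (f := fun (d : PySem.Dict String Int) (ic : Int × String) =>
          if d.contains ic.2 then d.insert ic.2 (d.getD ic.2 0 + 1) else d.insert ic.2 1)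
        (g := fun (d : PySem.Dict String (List Int)) (ic : Int × String) =>
          if ¬ d.contains ic.2 then d.insert ic.2 [ic.1]
          else d.modify ic.2 [] (fun l => l ++ [ic.1])),
      PySem.List.foldl_prod_mk
        (f := fun (d : PySem.Dict String Int) (c : String) =>
          d.insert c ((PySem.List.count chars c : Int)))
        (g := fun (d : PySem.Dict String (List Int)) (c : String) =>
          d.insert c (((PySem.List.enumerate chars).filter (fun p => p.2 == c)).map (fun p => p.1)))]
  rw [countStep_norm, posStep_norm]
  -- A's count fold is Counter(chars); A's position fold is posDict
  have hcnt : (PySem.List.enumerate chars).foldl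
      (fun (d : PySem.Dict String Int) (ic : Int × String) => d.insert ic.2 (d.getD ic.2 0 + 1))
      PySem.Dict.empty = PySem.Dict.counter chars := by
    have h := List.foldl_map (f := fun p : Int × String => p.2)
      (g := fun (d : PySem.Dict String Int) x => d.insert x (d.getD x 0 + 1))
      (l := PySem.List.enumerate chars) (init := PySem.Dict.empty)
    rw [PySem.List.map_snd_enumerate] at h
    exact h.symm.trans (PySem.Dict.foldl_insert_getD_add_one_eq_counter chars)
  have hpos : (PySem.List.enumerate chars).foldl
      (fun (d : PySem.Dict String (List Int)) (ic : Int × String) =>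
        d.modify ic.2 [] (fun l => l ++ [ic.1]))
      PySem.Dict.empty = posDict chars := by
    have h := List.foldl_map (f := fun p : Int × String => Prod.swap p)
      (g := fun (d : PySem.Dict String (List Int)) (p : String × Int) =>
        d.modify p.1 [] (fun l => l ++ [p.2]))
      (l := PySem.List.enumerate chars) (init := PySem.Dict.empty)
    exact h.symm
  rw [hcnt, hpos]
  -- B's folds over the distinct keys append fresh entries
  have hfreshC : ((PySem.List.dedup chars).foldl
      (fun (d : PySem.Dict String Int) c => d.insert c ((PySem.List.count chars c : Int)))
      PySem.Dict.empty).items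
      = (PySem.List.dedup chars).map (fun c => (c, (PySem.List.count chars c : Int))) := by
    have h := PySem.Dict.items_foldl_insert_fresh (PySem.List.dedup chars)
      (fun c : String => c) (fun c => (PySem.List.count chars c : Int)) PySem.Dict.empty
      (by intro a _; simp) (by simp [PySem.List.nodup_dedup chars])
    simpa using h
  have hfreshP : ((PySem.List.dedup chars).foldl
      (fun (d : PySem.Dict String (List Int)) c =>
        d.insert c (((PySem.List.enumerate chars).filter (fun p => p.2 == c)).map (fun p => p.1)))
      PySem.Dict.empty).items
      = (PySem.List.dedup chars).map
          (fun c => (c, ((PySem.List.enumerate chars).filter (fun p => p.2 == c)).map (fun p => p.1))) := by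
    have h := PySem.Dict.items_foldl_insert_fresh (PySem.List.dedup chars)
      (fun c : String => c)
      (fun c => ((PySem.List.enumerate chars).filter (fun p => p.2 == c)).map (fun p => p.1))
      PySem.Dict.empty (by intro a _; simp) (by simp [PySem.List.nodup_dedup chars])
    simpa using h
  rw [hfreshC, hfreshP, posDict_items, PySem.Dict.items_counter]
  simp [PySem.List.dedup_eq_ofList, PySem.List.count_eq]
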